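-- pv_equiv track=rewrite | github.com/pc5401/my_BOJ | 백준/Silver/28064. 이민희진/이민희진.py | check
-- ===== SOURCE A (Python) =====
-- def check(s: str, t: str) -> bool:
--     l = min(len(s), len(t))
--
--     for i in range(l):
--         if s[-i-1:] == t[0:i+1]:
--             return 1
--
--         if t[-i-1:] == s[0:i+1]:
--             return 1
--
--     return 0
-- ===== SOURCE B (Python) =====
-- def _overlap(s: str, t: str) -> bool:
--     # NFA-style simulation: one left-to-right pass over t maintaining the set
--     # 'alive' of start positions i in s with s[i:i+j] == t[:j] after j chars;
--     # success when the candidate ending exactly at the end of s survives.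
--     n = len(s)
--     alive = list(range(n))
--     for j, c in enumerate(t):
--         alive = [i for i in alive if i + j < n and s[i + j] == c]
--         if n - j - 1 in alive:
--             return True
--         if not alive:
--             return False
--     return False
--
--
-- def check(s: str, t: str) -> int:
--     return 1 if _overlap(s, t) or _overlap(t, s) else 0
-- ===== Notes on version B (the rewrite author's own statement) =====
-- stated objective: alternative
-- what changed: A tries every overlap length, building and comparing a suffix slice against a prefix slice (twice per length); B instead makes one left-to-right pass over the second string, maintaining the set of live candidate start positions in the first string (NFA-style multi-suffix matching) and succeeding when the candidate that ends exactly at the string's end survives.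
import Mathlib
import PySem

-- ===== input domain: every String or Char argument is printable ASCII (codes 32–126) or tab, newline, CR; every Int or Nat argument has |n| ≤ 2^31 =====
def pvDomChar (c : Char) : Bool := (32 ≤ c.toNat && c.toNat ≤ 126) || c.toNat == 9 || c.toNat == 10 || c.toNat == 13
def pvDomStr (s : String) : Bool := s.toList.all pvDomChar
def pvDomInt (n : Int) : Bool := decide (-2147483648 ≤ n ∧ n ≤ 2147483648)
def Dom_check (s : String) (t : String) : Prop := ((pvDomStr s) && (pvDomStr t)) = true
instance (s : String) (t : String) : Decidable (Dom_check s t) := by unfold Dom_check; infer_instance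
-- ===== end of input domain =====

-- B replaces A's try-every-overlap-length slice comparisons by a single left-to-right
-- NFA-style pass over the second string maintaining the set of live candidate start
-- positions in the first (alternative algorithm; return value only, no mutation).

-- ===== PORT A =====
-- the for-loop with early 'return 1' over i in range(l)
def checkGo (sl tl : List Char) : List Int → Int
  | [] => 0
  | i :: rest =>
    if PySem.List.slice sl (some (-i - 1)) none = PySem.List.slice tl (some 0) (some (i + 1)) then 1
    else if PySem.List.slice tl (some (-i - 1)) none = PySem.List.slice sl (some 0) (some (i + 1)) then 1
    else checkGo sl tl rest

def check (s : String) (t : String) : Int :=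
  let l : Int := min (s.toList.length : Int) (t.toList.length : Int)
  checkGo s.toList t.toList (PySem.List.pyRange 0 l 1)

-- ===== PORT B =====
-- the 'for j, c in enumerate(t)' loop of _overlap, over the remaining characters of t
def simGo (sl : List Char) (n : Int) : Int → List Int → List Char → Bool
  | _, _, [] => false
  | j, alive, c :: rest =>
    let alive' := alive.filter (fun i =>
      decide (i + j < n) && decide (PySem.List.pyGet? sl (i + j) = some c))
    if (n - j - 1) ∈ alive' then true
    else if alive'.isEmpty then false
    else simGo sl n (j + 1) alive' rest

def overlapSim (a b : List Char) : Bool :=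
  simGo a (a.length : Int) 0 (PySem.List.pyRange 0 (a.length : Int) 1) b

def check_alt (s : String) (t : String) : Int :=
  if overlapSim s.toList t.toList || overlapSim t.toList s.toList then 1 else 0

-- ===== PRECONDITION & SPEC =====
def Spec_check (s : String) (t : String) (out : Int) : Prop := out = check_alt s t
instance (s : String) (t : String) (out : Int) : Decidable (Spec_check s t out) := by unfold Spec_check; infer_instance

-- ===== CLAIM (what is proved, stated in full; the proofs are below) =====
def Claim_equal_check : Prop := ∀ (s : String) (t : String), Dom_check s t → Spec_check s t (check s t)

-- ===== LEMMAS AND PROOFS =====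

-- A's loop condition at index i (first branch; the second is PA tl sl i)
def PA (a b : List Char) (i : Int) : Prop :=
  PySem.List.slice a (some (-i - 1)) none = PySem.List.slice b (some 0) (some (i + 1))

-- "some non-empty suffix of a equals a prefix of b" (the overlap both programs detect)
def HasOv (a b : List Char) : Prop :=
  ∃ k : Nat, 1 ≤ k ∧ k ≤ a.length ∧ k ≤ b.length ∧ a.drop (a.length - k) = b.take k

-- B-side: 'candidate i is still alive after j characters' (pointwise match)
def MB (sl tl : List Char) (i j : Nat) : Prop :=
  i < sl.length ∧ i + j ≤ sl.length ∧ ∀ m, m < j → sl[i + m]? = tl[m]?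

-- B-side: 'success happens at some step after the first j characters'
def Succ (sl tl : List Char) (j : Nat) : Prop :=
  ∃ k : Nat, j < k ∧ k ≤ tl.length ∧ k ≤ sl.length ∧ sl.drop (sl.length - k) = tl.take k

theorem checkGo_mem (sl tl : List Char) (L : List Int) :
    checkGo sl tl L = 0 ∨ checkGo sl tl L = 1 := by
  induction L with
  | nil => simp [checkGo]
  | cons i rest ih => simp only [checkGo]; split_ifs <;> simp [ih]

theorem checkGo_one (sl tl : List Char) (L : List Int) :
    checkGo sl tl L = 1 ↔ ∃ i ∈ L, PA sl tl i ∨ PA tl sl i := by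
  induction L with
  | nil => simp [checkGo]
  | cons i rest ih =>
    simp only [checkGo]
    split_ifs with h1 h2
    · simp [PA, h1]
    · simp [PA, h2]
    · simp only [ih, List.mem_cons]
      constructor
      · rintro ⟨j, hj, hP⟩; exact ⟨j, Or.inr hj, hP⟩
      · rintro ⟨j, hj, hP⟩
        rcases hj with rfl | hj
        · exfalso
          rcases hP with hP | hP
          · exact h1 hP
          · exact h2 hP
        · exact ⟨j, hj, hP⟩

theorem PA_iff (a b : List Char) (j : Nat) :
    PA a b (j : Int) ↔ a.drop (a.length - (j + 1)) = b.take (j + 1) := by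
  unfold PA
  have h1 : (-(j : Int) - 1) = -((j + 1 : Nat) : Int) := by push_cast; ring
  have h2 : ((j : Int) + 1) = ((j + 1 : Nat) : Int) := by push_cast; ring
  rw [h1, h2, PySem.List.slice_from_neg_natCast a (j + 1) (Nat.succ_pos j),
    PySem.List.slice_zero_start, PySem.List.slice_to_natCast]

theorem exA (a b : List Char) :
    (∃ i ∈ PySem.List.pyRange 0 (min (a.length : Int) (b.length : Int)) 1, PA a b i)
      ↔ HasOv a b := by
  constructor
  · rintro ⟨i, hmem, hP⟩
    rw [PySem.List.mem_pyRange_one] at hmem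
    obtain ⟨h0, hlt⟩ := hmem
    lift i to Nat using h0 with j
    refine ⟨j + 1, by omega, ?_, ?_, (PA_iff a b j).mp hP⟩ <;>
      · simp only [lt_min_iff] at hlt; omega
  · rintro ⟨k, hk1, hka, hkb, hov⟩
    refine ⟨((k - 1 : Nat) : Int), ?_, ?_⟩
    · rw [PySem.List.mem_pyRange_one]
      constructor
      · positivity
      · simp only [lt_min_iff]; omega
    · rw [PA_iff]
      have : k - 1 + 1 = k := by omega
      rw [this]; exact hov

theorem check_one (s t : String) :
    check s t = 1 ↔ HasOv s.toList t.toList ∨ HasOv t.toList s.toList := by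
  unfold check
  rw [checkGo_one]
  have hmin : min (s.toList.length : Int) (t.toList.length : Int)
      = min (t.toList.length : Int) (s.toList.length : Int) := min_comm _ _
  constructor
  · rintro ⟨i, hmem, hP | hP⟩
    · exact Or.inl ((exA _ _).mp ⟨i, hmem, hP⟩)
    · exact Or.inr ((exA _ _).mp ⟨i, by rwa [hmin] at hmem, hP⟩)
  · rintro (h | h)
    · obtain ⟨i, hmem, hP⟩ := (exA _ _).mpr h
      exact ⟨i, hmem, Or.inl hP⟩
    · obtain ⟨i, hmem, hP⟩ := (exA _ _).mpr h
      exact ⟨i, by rwa [hmin], Or.inr hP⟩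

-- a full-length live candidate is exactly a suffix/prefix overlap
theorem mb_drop_take (sl tl : List Char) (k : Nat) (hk1 : 1 ≤ k)
    (hka : k ≤ sl.length) (hkb : k ≤ tl.length) :
    MB sl tl (sl.length - k) k ↔ sl.drop (sl.length - k) = tl.take k := by
  constructor
  · rintro ⟨-, -, hpt⟩
    apply List.ext_getElem?
    intro m
    by_cases hm : m < k
    · rw [List.getElem?_drop, List.getElem?_take_of_lt hm]
      exact hpt m hm
    · rw [List.getElem?_eq_none, List.getElem?_eq_none]
      · simp only [List.length_take]; omega
      · simp only [List.length_drop]; omega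
  · intro heq
    refine ⟨by omega, by omega, fun m hm => ?_⟩
    have h1 : (sl.drop (sl.length - k))[m]? = sl[sl.length - k + m]? := List.getElem?_drop ..
    have h2 : (tl.take k)[m]? = tl[m]? := List.getElem?_take_of_lt hm
    rw [← h1, heq, h2]

theorem MB_mono (sl tl : List Char) (i j k : Nat) (hjk : j ≤ k) (h : MB sl tl i k) :
    MB sl tl i j := by
  obtain ⟨h1, h2, h3⟩ := h
  exact ⟨h1, by omega, fun m hm => h3 m (by omega)⟩

theorem MB_succ (sl tl : List Char) (i j : Nat) (c : Char) (hc : tl[j]? = some c) :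
    MB sl tl i (j + 1) ↔ MB sl tl i j ∧ i + j < sl.length ∧ sl[i + j]? = some c := by
  constructor
  · rintro ⟨h1, h2, h3⟩
    refine ⟨⟨h1, by omega, fun m hm => h3 m (by omega)⟩, by omega, ?_⟩
    rw [h3 j (by omega), hc]
  · rintro ⟨⟨h1, h2, h3⟩, hlt, hget⟩
    refine ⟨h1, by omega, fun m hm => ?_⟩
    rcases Nat.lt_succ_iff_lt_or_eq.mp hm with hm' | rfl
    · exact h3 m hm'
    · rw [hget, hc]

-- the main loop invariant for simGo
theorem simGo_iff (sl tl : List Char) : ∀ (rest : List Char) (jN : Nat) (alive : List Int),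
    tl.drop jN = rest →
    (∀ i ∈ alive, 0 ≤ i) →
    (∀ iN : Nat, ((iN : Int) ∈ alive ↔ MB sl tl iN jN)) →
    (simGo sl (sl.length : Int) (jN : Int) alive rest = true ↔ Succ sl tl jN) := by
  intro rest
  induction rest with
  | nil =>
    intro jN alive hdrop _ _
    have hlen : tl.length ≤ jN := by
      by_contra h
      have := congrArg List.length hdrop
      simp only [List.length_drop, List.length_nil] at this
      omega
    refine iff_of_false (by simp [simGo]) ?_
    rintro ⟨k, hk1, hk2, -, -⟩; omega
  | cons c rest' ih =>
    intro jN alive hdrop hval hmem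
    have hjlt : jN < tl.length := by
      by_contra h
      rw [List.drop_eq_nil_of_le (by omega)] at hdrop
      simp at hdrop
    have hc : tl[jN]? = some c := by
      have hg : (tl.drop jN)[0]? = tl[jN + 0]? := List.getElem?_drop ..
      rw [hdrop] at hg
      simpa using hg.symm
    have hdrop' : tl.drop (jN + 1) = rest' := by
      rw [← List.tail_drop, hdrop, List.tail_cons]
    simp only [simGo]
    set alive' := alive.filter (fun i =>
      decide (i + (jN : Int) < (sl.length : Int)) &&
        decide (PySem.List.pyGet? sl (i + (jN : Int)) = some c)) with halive'
    have hval' : ∀ i ∈ alive', 0 ≤ i := fun i hi => hval i (List.mem_of_mem_filter hi)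
    have hmem' : ∀ iN : Nat, ((iN : Int) ∈ alive' ↔ MB sl tl iN (jN + 1)) := by
      intro iN
      rw [halive', List.mem_filter]
      have hcast : ((iN : Int) + (jN : Int)) = ((iN + jN : Nat) : Int) := by push_cast; ring
      rw [MB_succ sl tl iN jN c hc, hmem iN]
      simp only [hcast, PySem.List.pyGet?_natCast, Bool.and_eq_true, decide_eq_true_eq]
      constructor
      · rintro ⟨h1, h2, h3⟩; exact ⟨h1, by exact_mod_cast h2, h3⟩
      · rintro ⟨h1, h2, h3⟩; exact ⟨h1, by exact_mod_cast h2, h3⟩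
    -- success at step jN (i.e. k = jN + 1) ↔ the membership test fires
    have hsucc1 : ((sl.length : Int) - (jN : Int) - 1) ∈ alive' ↔
        (jN + 1 ≤ tl.length ∧ jN + 1 ≤ sl.length ∧
          sl.drop (sl.length - (jN + 1)) = tl.take (jN + 1)) := by
      constructor
      · intro hin
        have hnn : (0 : Int) ≤ (sl.length : Int) - (jN : Int) - 1 := hval' _ hin
        have hle : jN + 1 ≤ sl.length := by omega
        have hcast : ((sl.length : Int) - (jN : Int) - 1) = ((sl.length - (jN + 1) : Nat) : Int) := by
          omega
        rw [hcast, hmem'] at hin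
        exact ⟨by omega, hle, (mb_drop_take sl tl (jN + 1) (by omega) hle (by omega)).mp hin⟩
      · rintro ⟨h1, h2, h3⟩
        have hcast : ((sl.length : Int) - (jN : Int) - 1) = ((sl.length - (jN + 1) : Nat) : Int) := by
          omega
        rw [hcast, hmem']
        exact (mb_drop_take sl tl (jN + 1) (by omega) h2 h1).mpr h3
    split_ifs with hif hemp
    · simp only [true_iff]
      obtain ⟨h1, h2, h3⟩ := hsucc1.mp hif
      exact ⟨jN + 1, by omega, h1, h2, h3⟩
    · simp only [false_iff]
      rintro ⟨k, hk1, hk2, hk3, hk4⟩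
      have hmb : MB sl tl (sl.length - k) k :=
        (mb_drop_take sl tl k (by omega) hk3 hk2).mpr hk4
      have hmb' : MB sl tl (sl.length - k) (jN + 1) := MB_mono sl tl _ _ _ (by omega) hmb
      have : ((sl.length - k : Nat) : Int) ∈ alive' := (hmem' _).mpr hmb'
      rw [List.isEmpty_iff] at hemp
      rw [hemp] at this
      exact absurd this (List.not_mem_nil)
    · have hcast : ((jN : Int) + 1) = ((jN + 1 : Nat) : Int) := by push_cast; ring
      rw [hcast, ih (jN + 1) alive' hdrop' hval' hmem']
      constructor
      · rintro ⟨k, hk1, hk2, hk3, hk4⟩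
        exact ⟨k, by omega, hk2, hk3, hk4⟩
      · rintro ⟨k, hk1, hk2, hk3, hk4⟩
        rcases Nat.lt_or_ge (jN + 1) k with hk | hk
        · exact ⟨k, hk, hk2, hk3, hk4⟩
        · exfalso
          have hkeq : k = jN + 1 := by omega
          subst hkeq
          exact hif (hsucc1.mpr ⟨hk2, hk3, hk4⟩)

theorem ovSim_iff (a b : List Char) : overlapSim a b = true ↔ HasOv a b := by
  unfold overlapSim
  have key := simGo_iff a b b 0 (PySem.List.pyRange 0 (a.length : Int) 1) List.drop_zero
    (fun i hi => ((PySem.List.mem_pyRange_one).mp hi).1)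
    (fun iN => by
      rw [PySem.List.mem_pyRange_one]
      unfold MB
      constructor
      · rintro ⟨-, hlt⟩
        have hlt' : iN < a.length := by exact_mod_cast hlt
        exact ⟨hlt', by omega, fun m hm => absurd hm (by omega)⟩
      · rintro ⟨h1, -, -⟩
        exact ⟨by positivity, by exact_mod_cast h1⟩)
  simp only [Nat.cast_zero] at key
  rw [key]
  constructor
  · rintro ⟨k, h1, h2, h3, h4⟩; exact ⟨k, h1, h3, h2, h4⟩
  · rintro ⟨k, h1, h2, h3, h4⟩; exact ⟨k, h1, h3, h2, h4⟩

theorem alt_one (s t : String) :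
    check_alt s t = 1 ↔ HasOv s.toList t.toList ∨ HasOv t.toList s.toList := by
  unfold check_alt
  split_ifs with h
  · simp only [Bool.or_eq_true] at h
    constructor
    · intro _
      rcases h with h | h
      · exact Or.inl ((ovSim_iff _ _).mp h)
      · exact Or.inr ((ovSim_iff _ _).mp h)
    · intro _; rfl
  · simp only [Bool.or_eq_true, not_or] at h
    constructor
    · intro hcontra; exact absurd hcontra (by norm_num)
    · rintro (hov | hov)
      · exact absurd ((ovSim_iff _ _).mpr hov) h.1
      · exact absurd ((ovSim_iff _ _).mpr hov) h.2

theorem alt_mem (s t : String) : check_alt s t = 0 ∨ check_alt s t = 1 := by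
  unfold check_alt; split_ifs <;> simp

-- ===== VERDICT (by name: the statement is the Claim_ definition above) =====
theorem check_spec : Claim_equal_check := by
  intro s t _
  unfold Spec_check
  have hA : check s t = 0 ∨ check s t = 1 := checkGo_mem s.toList t.toList _
  have h1 := check_one s t
  have h2 := alt_one s t
  rcases hA with ha | ha <;> rcases alt_mem s t with hb | hb
  · rw [ha, hb]
  · exfalso
    rw [ha] at h1; rw [hb] at h2
    exact absurd (h1.mpr (h2.mp rfl)) (by norm_num)
  · exfalso
    rw [ha] at h1; rw [hb] at h2
    exact absurd (h2.mpr (h1.mp rfl)) (by norm_num)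
  · rw [ha, hb]
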